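-- pv_equiv track=rewrite | github.com/RafinhaTN/Scrum | 4 - Done/Trabalho/rafael_torres_nantes.py | bichos
-- ===== SOURCE A (Python) =====
-- def bichos(n, m):
--     """
--     :param n: Transformo  os 2 ultimos nº de "n"
--     :param m: Transformo  os 2 ultimos nº de "m"
--     :return jogo_bicho: Envio um TRUE or FALSE caso aconteça ou não
--     """
--
--     n = n % 100  # Explicito que só quero os 2 ultimos nº de "n"
--     m = m % 100  # Explicito que só quero os 2 ultimos nº de "m"
--
--     if n == 00:  # O nº 100 da listinha tem 3 digitos, logo o "00" irá assumir papel de 100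
--         n = 100
--
--     if m == 00:  # O nº 100 da listinha tem 3 digitos, logo o "00" irá assumir papel de 100
--         m = 100
--
--     for i in range(1, 101, 4):  # Criei uma lista que vai de 1 até 100, ao passo 4
--
--         if i <= n < i + 4 and i <= m < i + 4:  # Identifico se "n" pertence ao mesmo grupo que "m"
--             jogo_bicho = True  # Crio uma variavel que prove se o valor é verdadeiro
--             break
--
--     else:
--         jogo_bicho = False  # Se não for, ela é falsa
--
--     return jogo_bicho
-- ===== SOURCE B (Python) =====
-- def bichos(n, m):
--     n = n % 100
--     m = m % 100
--     if n == 0: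
--         n = 100
--     if m == 0:
--         m = 100
--     return (n - 1) // 4 == (m - 1) // 4
-- ===== Notes on version B (the rewrite author's own statement) =====
-- stated objective: simpler
-- what changed: Replaces the for/else scan over the 25 group start points (with break and a flag variable) by a single closed-form comparison of the two group indices (n-1)//4 == (m-1)//4 after the same %100 and 0->100 normalization.
import Mathlib
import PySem

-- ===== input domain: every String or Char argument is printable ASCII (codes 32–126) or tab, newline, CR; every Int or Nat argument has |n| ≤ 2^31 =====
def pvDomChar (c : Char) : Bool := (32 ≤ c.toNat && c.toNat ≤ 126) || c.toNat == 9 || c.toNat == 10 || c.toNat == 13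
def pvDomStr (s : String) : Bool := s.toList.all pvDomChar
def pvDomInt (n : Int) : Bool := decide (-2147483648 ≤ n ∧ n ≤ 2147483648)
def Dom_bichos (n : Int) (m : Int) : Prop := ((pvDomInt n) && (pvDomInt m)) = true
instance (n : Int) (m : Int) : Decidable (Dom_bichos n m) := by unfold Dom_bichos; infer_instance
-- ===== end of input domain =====

-- B replaces A's for/else scan over the 25 group start points by the closed-form
-- group-index comparison (n-1)//4 == (m-1)//4 after the same normalization (simpler).


-- ===== PORT A =====
-- for i in range(1, 101, 4): if i <= n < i+4 and i <= m < i+4: True; break  else: False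
def bichosLoop (n : Int) (m : Int) : List Int → Bool
  | [] => false
  | i :: rest =>
      if i ≤ n ∧ n < i + 4 ∧ i ≤ m ∧ m < i + 4 then true
      else bichosLoop n m rest

def bichos (n : Int) (m : Int) : Bool :=
  let n1 := PySem.Int.mod n 100
  let m1 := PySem.Int.mod m 100
  let n2 := if n1 = 0 then 100 else n1
  let m2 := if m1 = 0 then 100 else m1
  bichosLoop n2 m2 (PySem.List.pyRange 1 101 4)

-- ===== PORT B =====
def bichos_alt (n : Int) (m : Int) : Bool :=
  let n1 := PySem.Int.mod n 100
  let m1 := PySem.Int.mod m 100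
  let n2 := if n1 = 0 then 100 else n1
  let m2 := if m1 = 0 then 100 else m1
  decide (PySem.Int.floordiv (n2 - 1) 4 = PySem.Int.floordiv (m2 - 1) 4)

-- ===== PRECONDITION & SPEC =====
def Spec_bichos (n : Int) (m : Int) (out : Bool) : Prop := out = bichos_alt n m
instance (n : Int) (m : Int) (out : Bool) : Decidable (Spec_bichos n m out) := by unfold Spec_bichos; infer_instance

-- ===== CLAIM (what is proved, stated in full; the proofs are below) =====
def Claim_equal_bichos : Prop := ∀ (n : Int) (m : Int), Dom_bichos n m → Spec_bichos n m (bichos n m)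

-- ===== LEMMAS AND PROOFS =====

theorem bichosLoop_true_iff (n m : Int) (L : List Int) :
    bichosLoop n m L = true ↔ ∃ i ∈ L, i ≤ n ∧ n < i + 4 ∧ i ≤ m ∧ m < i + 4 := by
  induction L with
  | nil => simp [bichosLoop]
  | cons i rest ih =>
      simp only [bichosLoop, List.mem_cons]
      split_ifs with h
      · simp only [true_iff]
        exact ⟨i, Or.inl rfl, h⟩
      · simp only [ih]
        constructor
        · rintro ⟨j, hj, hp⟩; exact ⟨j, Or.inr hj, hp⟩
        · rintro ⟨j, hj | hj, hp⟩
          · exact absurd (hj ▸ hp) h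
          · exact ⟨j, hj, hp⟩

theorem loop_eq_closed (n m : Int) (hn1 : 1 ≤ n) (hn2 : n ≤ 100) :
    bichosLoop n m (PySem.List.pyRange 1 101 4) =
      decide (PySem.Int.floordiv (n - 1) 4 = PySem.Int.floordiv (m - 1) 4) := by
  apply Bool.eq_iff_iff.mpr
  rw [bichosLoop_true_iff, decide_eq_true_iff,
      PySem.Int.floordiv_eq_ediv_of_pos (a := n - 1) (by omega : (0:Int) < 4),
      PySem.Int.floordiv_eq_ediv_of_pos (a := m - 1) (by omega : (0:Int) < 4)]
  constructor
  · rintro ⟨i, hmem, hp⟩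
    rw [PySem.List.mem_pyRange_iff_of_pos (by omega : (0:Int) < 4)] at hmem
    omega
  · intro h
    refine ⟨4 * ((n - 1) / 4) + 1,
      (PySem.List.mem_pyRange_iff_of_pos (by omega : (0:Int) < 4) _).mpr (by omega), by omega⟩

theorem bichos_spec_aux (n m : Int) : bichos n m = bichos_alt n m := by
  unfold bichos bichos_alt
  dsimp only
  have hn := Int.emod_nonneg n (by omega : (100:Int) ≠ 0)
  have hn' := Int.emod_lt_of_pos n (by omega : (0:Int) < 100)
  have hm := Int.emod_nonneg m (by omega : (100:Int) ≠ 0)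
  have hm' := Int.emod_lt_of_pos m (by omega : (0:Int) < 100)
  rw [PySem.Int.mod_eq_emod_of_pos (a := n) (by omega : (0:Int) < 100),
      PySem.Int.mod_eq_emod_of_pos (a := m) (by omega : (0:Int) < 100)]
  apply loop_eq_closed <;> split_ifs <;> omega

-- ===== VERDICT (by name: the statement is the Claim_ definition above) =====
theorem bichos_spec : Claim_equal_bichos := by
  intro n m _
  exact bichos_spec_aux n m
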